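-- pv_equiv track=rewrite | github.com/clawtros/crospy | generator/cluefilters.py | dequotes
-- ===== SOURCE A (Python) =====
-- def dequotes(clue):
--     if clue.startswith('"') and clue.endswith('"'):
--         joiners = ['&ldquo;', '&rdquo;']
--         result = ""
--         split_clue = clue[1:-1].split('""')
--         for i, part in enumerate(split_clue):
--             result += part
--             if (i + 1) < len(split_clue):
--                 result += joiners[i % 2]
--         return result
--     return clue
-- ===== SOURCE B (Python) =====
-- def dequotes(clue):
--     if clue.startswith('"') and clue.endswith('"'):
--         inner = clue[1:-1]
--         out = []
--         opening = True
--         i = 0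
--         n = len(inner)
--         while i < n:
--             if inner[i] == '"' and i + 1 < n and inner[i + 1] == '"':
--                 out.append('&ldquo;' if opening else '&rdquo;')
--                 opening = not opening
--                 i += 2
--             else:
--                 out.append(inner[i])
--                 i += 1
--         return ''.join(out)
--     return clue
-- ===== Notes on version B (the rewrite author's own statement) =====
-- stated objective: alternative
-- what changed: Replaced A's split-on-doubled-quotes plus enumerate/index-parity join with a single forward character scan over the inner string that greedily consumes adjacent quote pairs and flips an open/close toggle.
import Mathlib
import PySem

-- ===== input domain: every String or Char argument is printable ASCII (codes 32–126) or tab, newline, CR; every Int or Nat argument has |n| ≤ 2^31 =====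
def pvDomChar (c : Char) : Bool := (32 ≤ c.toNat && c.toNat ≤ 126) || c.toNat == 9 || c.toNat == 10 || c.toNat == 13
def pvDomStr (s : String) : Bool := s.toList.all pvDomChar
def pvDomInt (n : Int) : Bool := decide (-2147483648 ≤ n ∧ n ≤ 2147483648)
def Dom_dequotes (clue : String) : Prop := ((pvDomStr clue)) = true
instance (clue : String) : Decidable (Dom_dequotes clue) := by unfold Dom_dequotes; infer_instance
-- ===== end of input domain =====

-- B replaces split('""')+join-by-index-parity with a single forward scan holding an open/close toggle (alternative decomposition, same cost).


-- ===== PORT A =====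
def dequotes (clue : String) : String :=
  if PySem.Str.startswith clue "\"" && PySem.Str.endswith clue "\"" then
    let joiners : List (List Char) := ["&ldquo;".toList, "&rdquo;".toList]
    let split_clue := PySem.Chars.splitOn (PySem.Str.slice clue (some 1) (some (-1))).toList ['"', '"']
    String.ofList ((PySem.List.enumerate split_clue 0).foldl
      (fun acc ip =>
        acc ++ ip.2 ++
          (if ip.1 + 1 < (split_clue.length : Int) then
            PySem.List.pyGetD joiners (PySem.Int.mod ip.1 2) []
          else []))
      [])
  else clue

-- ===== PORT B =====
-- Source B's forward scan: consume a '""' pair (current char + peek at the next) or copy one char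
def scanQuotes : List Char → Bool → List Char
  | [], _ => []
  | c :: rest, opening =>
      if c = '"' ∧ rest.head? = some '"' then
        (if opening then "&ldquo;".toList else "&rdquo;".toList) ++ scanQuotes rest.tail (!opening)
      else c :: scanQuotes rest opening
termination_by l => l.length
decreasing_by all_goals simp [List.length_tail]

def dequotes_alt (clue : String) : String :=
  if PySem.Str.startswith clue "\"" && PySem.Str.endswith clue "\"" then
    String.ofList (scanQuotes (PySem.Str.slice clue (some 1) (some (-1))).toList true)
  else clue

-- ===== PRECONDITION & SPEC =====
def Spec_dequotes (clue : String) (out : String) : Prop := out = dequotes_alt clue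
instance (clue : String) (out : String) : Decidable (Spec_dequotes clue out) := by unfold Spec_dequotes; infer_instance

-- ===== CLAIM (what is proved, stated in full; the proofs are below) =====
def Claim_equal_dequotes : Prop := ∀ (clue : String), Dom_dequotes clue → Spec_dequotes clue (dequotes clue)

-- ===== LEMMAS AND PROOFS =====

-- pure (fuel-free) version of PySem.Chars.splitOn.go specialised to sep = ['"','"']
def qparts : List Char → List Char → List (List Char)
  | [], cur => [cur.reverse]
  | c :: rest, cur =>
      if c = '"' ∧ rest.head? = some '"' then
        cur.reverse :: qparts rest.tail []
      else qparts rest (c :: cur)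
termination_by l => l.length
decreasing_by all_goals simp [List.length_tail]

lemma qparts_nil (cur : List Char) : qparts [] cur = [cur.reverse] := by
  rw [qparts]

lemma qparts_cons (c : Char) (rest cur : List Char) :
    qparts (c :: rest) cur =
      if c = '"' ∧ rest.head? = some '"' then
        cur.reverse :: qparts rest.tail []
      else qparts rest (c :: cur) := by
  rw [qparts]

lemma scanQuotes_nil (b : Bool) : scanQuotes [] b = [] := by
  rw [scanQuotes]

lemma scanQuotes_cons (c : Char) (rest : List Char) (b : Bool) :
    scanQuotes (c :: rest) b =
      if c = '"' ∧ rest.head? = some '"' then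
        (if b then "&ldquo;".toList else "&rdquo;".toList) ++ scanQuotes rest.tail (!b)
      else c :: scanQuotes rest b := by
  rw [scanQuotes]

lemma qparts_ne_nil (l cur : List Char) : qparts l cur ≠ [] := by
  induction l, cur using qparts.induct with
  | case1 cur => rw [qparts_nil]; simp
  | case2 c rest cur h ih => rw [qparts_cons, if_pos h]; simp
  | case3 c rest cur h ih => rw [qparts_cons, if_neg h]; exact ih

lemma prefix_pair_iff (c : Char) (rest : List Char) :
    (['"', '"'].isPrefixOf (c :: rest)) = true ↔ (c = '"' ∧ rest.head? = some '"') := by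
  rw [List.isPrefixOf_iff_prefix, List.cons_prefix_cons]
  cases rest with
  | nil => simp [eq_comm]
  | cons d rs => rw [List.cons_prefix_cons]; simp [eq_comm]

lemma go_eq_qparts (fuel : Nat) (l cur : List Char) (acc : List (List Char))
    (h : l.length ≤ fuel) :
    PySem.Chars.splitOn.go ['"', '"'] fuel l cur acc = acc.reverse ++ qparts l cur := by
  induction fuel generalizing l cur acc with
  | zero =>
      have hl : l = [] := by cases l <;> simp_all
      subst hl
      rw [PySem.Chars.splitOn.go.eq_def, qparts_nil]
      simp
  | succ n ih =>
      cases l with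
      | nil =>
          rw [PySem.Chars.splitOn.go.eq_def, qparts_nil]
          simp
      | cons c rest =>
          have hlen : rest.length + 1 ≤ n + 1 := by simpa using h
          rw [PySem.Chars.splitOn.go.eq_def]
          by_cases hc : c = '"' ∧ rest.head? = some '"'
          · have hp : ['"', '"'].isPrefixOf (c :: rest) = true := (prefix_pair_iff c rest).2 hc
            have hdrop : List.drop (['"', '"'] : List Char).length (c :: rest) = rest.tail := by
              cases rest <;> simp
            simp only [hp, if_true]
            rw [hdrop, ih rest.tail [] (cur.reverse :: acc) (by simp [List.length_tail]; omega)]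
            rw [qparts_cons, if_pos hc]
            simp
          · have hp : ['"', '"'].isPrefixOf (c :: rest) = false := by
              rw [← Bool.not_eq_true, prefix_pair_iff]; exact hc
            simp only [hp, Bool.false_eq_true, if_false]
            rw [ih rest (c :: cur) acc (by omega)]
            rw [qparts_cons, if_neg hc]
  
lemma splitOn_eq_qparts (l : List Char) :
    PySem.Chars.splitOn l ['"', '"'] = qparts l [] := by
  show PySem.Chars.splitOn.go ['"', '"'] (l.length + 1) l [] [] = qparts l []
  rw [go_eq_qparts _ _ _ _ (by omega)]
  rfl

-- alternating join of the parts (what A's enumerate/parity fold produces)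
def joinAlt : List (List Char) → Bool → List Char
  | [], _ => []
  | p :: ps, b =>
      p ++ (if ps.isEmpty then [] else if b then "&ldquo;".toList else "&rdquo;".toList)
        ++ joinAlt ps (!b)

lemma joinAlt_nil (b : Bool) : joinAlt [] b = [] := rfl

lemma joinAlt_cons (p : List Char) (ps : List (List Char)) (b : Bool) :
    joinAlt (p :: ps) b =
      p ++ (if ps.isEmpty then [] else if b then "&ldquo;".toList else "&rdquo;".toList)
        ++ joinAlt ps (!b) := rfl

lemma joinAlt_qparts (l cur : List Char) (b : Bool) :
    joinAlt (qparts l cur) b = cur.reverse ++ scanQuotes l b := by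
  induction l, cur using qparts.induct generalizing b with
  | case1 cur => rw [qparts_nil, scanQuotes_nil, joinAlt_cons, joinAlt_nil]; simp
  | case2 c rest cur h ih =>
      rw [qparts_cons, if_pos h, scanQuotes_cons, if_pos h, joinAlt_cons]
      have hne : (qparts rest.tail []).isEmpty = false := by
        simpa [List.isEmpty_iff] using qparts_ne_nil rest.tail []
      rw [hne, ih]
      simp
  | case3 c rest cur h ih =>
      rw [qparts_cons, if_neg h, scanQuotes_cons, if_neg h, ih]
      simp

lemma mod_two_getD (s : Int) :
    PySem.List.pyGetD ["&ldquo;".toList, "&rdquo;".toList] (PySem.Int.mod s 2) ([] : List Char)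
      = (if (s % 2 == 0) then "&ldquo;".toList else "&rdquo;".toList) := by
  have hm : PySem.Int.mod s 2 = s % 2 := by
    simp [PySem.Int.mod, Int.fmod_eq_emod]
  rw [hm]
  rcases Int.emod_two_eq_zero_or_one s with h | h <;>
    simp [h, PySem.List.pyGetD, PySem.List.pyGet?, PySem.List.pyIdx?]

lemma succ_parity (s : Int) : ((s + 1) % 2 == 0) = !(s % 2 == 0) := by
  rcases Int.emod_two_eq_zero_or_one s with h | h <;>
    · have h2 : (s + 1) % 2 = 1 - s % 2 := by omega
      simp [h2, h]

lemma foldA_eq_joinAlt (N : Int) (ps : List (List Char)) (s : Int) (acc : List Char)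
    (hN : s + ps.length = N) :
    (PySem.List.enumerate ps s).foldl
      (fun acc ip =>
        acc ++ ip.2 ++
          (if ip.1 + 1 < N then
            PySem.List.pyGetD ["&ldquo;".toList, "&rdquo;".toList] (PySem.Int.mod ip.1 2) []
          else []))
      acc = acc ++ joinAlt ps (s % 2 == 0) := by
  induction ps generalizing s acc with
  | nil => simp [PySem.List.enumerate_nil, joinAlt_nil]
  | cons p ps ih =>
      rw [PySem.List.enumerate_cons, List.foldl_cons,
          ih (s + 1) _ (by simp at hN ⊢; omega)]
      rw [joinAlt_cons, succ_parity]
      cases ps with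
      | nil =>
          have hlt : ¬ (s + 1 < N) := by simp at hN; omega
          simp [hlt, joinAlt_nil]
      | cons q qs =>
          have hlt : s + 1 < N := by simp at hN; omega
          simp only [hlt, if_true, mod_two_getD, List.isEmpty_cons]
          simp

-- ===== VERDICT (by name: the statement is the Claim_ definition above) =====
set_option maxHeartbeats 1600000 in
theorem dequotes_spec : Claim_equal_dequotes := by
  intro clue _
  unfold Spec_dequotes dequotes dequotes_alt
  by_cases hg : (PySem.Str.startswith clue "\"" && PySem.Str.endswith clue "\"") = true
  · rw [if_pos hg, if_pos hg]
    simp only [splitOn_eq_qparts]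
    rw [foldA_eq_joinAlt
          ((qparts (PySem.Str.slice clue (some 1) (some (-1))).toList []).length : Int)
          (qparts (PySem.Str.slice clue (some 1) (some (-1))).toList []) 0 [] (by simp)]
    rw [joinAlt_qparts]
    simp
  · rw [if_neg hg, if_neg hg]
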